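-- pv_equiv track=rewrite | github.com/EmadDeve20/gnu2048 | push_numbers.py | can_pushing_left
-- ===== SOURCE A (Python) =====
-- def can_pushing_left(mat):
--     """this is function can checking for we can pushing numbers to the left or not"""
--     for i in range(len(mat)):
--         # checks whether equal numbers are next to each other in the matrix
--         # either there is empty space or not
--         # if not, the matrix can not be pushing numbers to left
--         for j in range(len(mat)-1 , 0 , -1):
--             if mat[i][j] == mat[i][j-1] and mat[i][j] != 0:
--                 return True
--             if mat[i][j] != 0 and mat[i][j-1] == 0:
--                 return True
--     # If matrix can not pushing numbers to left, this function returning False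
--     return False
-- ===== SOURCE B (Python) =====
-- def can_pushing_left(mat):
--     """this is function can checking for we can pushing numbers to the left or not"""
--     n = len(mat)
--     for row in mat:
--         cells = row[:n]  # the n-wide board row
--         stripped = [x for x in cells if x != 0]
--         # a gap: some zero precedes a non-zero (the non-zeros are not a prefix)
--         if stripped != cells[:len(stripped)]:
--             return True
--         # a merge: two equal tiles are adjacent after compaction
--         if any(a == b for a, b in zip(stripped, stripped[1:])):
--             return True
--     return False
-- ===== Notes on version B (the rewrite author's own statement) =====
-- stated objective: alternative
-- what changed: B compacts each len(mat)-wide board row to its zero-stripped form and tests 'non-zeros are not a prefix' (gap) or 'equal consecutive compacted tiles' (merge), instead of A's single descending adjacent-pair index scan over columns len(mat)-1..1; Pre_ is exactly A's returning domain (A raises IndexError when it reaches a row shorter than len(mat) before any pushable row).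
import Mathlib
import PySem

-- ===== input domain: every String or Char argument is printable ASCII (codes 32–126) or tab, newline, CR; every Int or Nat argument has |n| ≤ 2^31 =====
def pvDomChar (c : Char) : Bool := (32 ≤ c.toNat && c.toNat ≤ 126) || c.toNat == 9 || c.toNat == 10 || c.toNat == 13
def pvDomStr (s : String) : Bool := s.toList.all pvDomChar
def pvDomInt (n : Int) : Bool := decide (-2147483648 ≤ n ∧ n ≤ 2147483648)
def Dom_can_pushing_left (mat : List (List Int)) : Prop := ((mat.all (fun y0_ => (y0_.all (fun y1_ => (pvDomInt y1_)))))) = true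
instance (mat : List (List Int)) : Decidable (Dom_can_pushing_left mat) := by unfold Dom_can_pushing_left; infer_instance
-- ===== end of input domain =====

-- B compacts each row and tests gap (non-zeros are not a prefix) or merge (equal consecutive
-- compacted tiles), instead of A's descending adjacent-pair index scan; same cost, different shape.

-- ===== PORT A =====
-- inner 'for j in range(len(mat)-1, 0, -1): … return True' loop of A; n is len(mat)
def pvInnerA (n : Int) (row : List Int) : Bool :=
  (PySem.List.pyRange (n - 1) 0 (-1)).any (fun j =>
    ((PySem.List.pyGetD row j 0 == PySem.List.pyGetD row (j - 1) 0) &&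
      !(PySem.List.pyGetD row j 0 == 0)) ||
    (!(PySem.List.pyGetD row j 0 == 0) && (PySem.List.pyGetD row (j - 1) 0 == 0)))

def can_pushing_left (mat : List (List Int)) : Bool :=
  (PySem.List.pyRange 0 (PySem.List.len mat) 1).any (fun i =>
    pvInnerA (PySem.List.len mat) (PySem.List.pyGetD mat i []))

-- ===== PORT B =====
-- body of B's 'for row in mat' loop: slice off the n-wide board row, gap check, then merge check
def pvRowB (n : Nat) (row : List Int) : Bool :=
  let cells := row.take n
  let stripped := cells.filter (fun x => !(x == 0))
  (!(stripped == cells.take stripped.length)) ||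
    ((stripped.zip stripped.tail).any (fun p => p.1 == p.2))

def can_pushing_left_alt (mat : List (List Int)) : Bool :=
  mat.any (pvRowB mat.length)

-- ===== PRECONDITION & SPEC =====
-- Pre_ is exactly the set of inputs on which A returns: A indexes every row at columns
-- 0..len(mat)-1 (nothing when len(mat) < 2), so it raises IndexError at the first row shorter
-- than len(mat) — unless some earlier row already made it return True, i.e. some earlier row
-- has an adjacent pushable pair (equal non-zero cells, or a zero directly left of a non-zero)
-- within the first len(mat) columns.
def Pre_can_pushing_left (mat : List (List Int)) : Prop :=
  2 ≤ mat.length →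
    ∀ i < mat.length, mat.length ≤ (mat.getD i []).length ∨
      ∃ k < i, ∃ j < mat.length, j + 1 < mat.length ∧ j + 1 < (mat.getD k []).length ∧
        (((mat.getD k []).getD (j + 1) 0 = (mat.getD k []).getD j 0 ∧
            (mat.getD k []).getD (j + 1) 0 ≠ 0) ∨
          ((mat.getD k []).getD (j + 1) 0 ≠ 0 ∧ (mat.getD k []).getD j 0 = 0))
instance (mat : List (List Int)) : Decidable (Pre_can_pushing_left mat) := by
  unfold Pre_can_pushing_left; infer_instance

def pvWitness_can_pushing_left : List (List Int) := [[2, 0], [0, 2]]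

def Spec_can_pushing_left (mat : List (List Int)) (out : Bool) : Prop := out = can_pushing_left_alt mat
instance (mat : List (List Int)) (out : Bool) : Decidable (Spec_can_pushing_left mat out) := by unfold Spec_can_pushing_left; infer_instance

-- ===== CLAIM (what is proved, stated in full; the proofs are below) =====
def Claim_equal_can_pushing_left : Prop := ∀ (mat : List (List Int)), Dom_can_pushing_left mat → Pre_can_pushing_left mat → Spec_can_pushing_left mat (can_pushing_left mat)

-- ===== LEMMAS AND PROOFS =====

-- the per-cells body of pvRowB, on an arbitrary list
def pvRowCore (row : List Int) : Bool :=
  let stripped := row.filter (fun x => !(x == 0))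
  (!(stripped == row.take stripped.length)) ||
    ((stripped.zip stripped.tail).any (fun p => p.1 == p.2))

lemma pvRowB_eq_core (n : Nat) (row : List Int) : pvRowB n row = pvRowCore (row.take n) := rfl

-- proof-side structural re-statement of A's inner scan: adjacent-pair walk down the row
def pvAdjScan : List Int → Bool
  | a :: b :: rest =>
      (((b == a) && !(b == 0)) || (!(b == 0) && (a == 0))) || pvAdjScan (b :: rest)
  | _ => false

-- the adjacent-pair condition at index k (second element at k+1), via getD
def pvC (row : List Int) (k : Nat) : Bool :=
  ((row.getD (k + 1) 0 == row.getD k 0) && !(row.getD (k + 1) 0 == 0)) ||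
  (!(row.getD (k + 1) 0 == 0) && (row.getD k 0 == 0))

lemma pvAdjScan_iff (l : List Int) :
    pvAdjScan l = true ↔ ∃ k : Nat, k + 1 < l.length ∧ pvC l k = true := by
  induction l with
  | nil => simp [pvAdjScan]
  | cons a t ih =>
    cases t with
    | nil =>
      simp only [pvAdjScan, List.length_cons, List.length_nil]
      constructor
      · intro h; exact absurd h (by simp)
      · rintro ⟨k, hk, -⟩; omega
    | cons b rest =>
      simp only [pvAdjScan, Bool.or_eq_true, ih]
      constructor
      · rintro (h | ⟨k, hk, hc⟩)
        · exact ⟨0, by simp, by simpa [pvC] using h⟩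
        · exact ⟨k + 1, by simpa using Nat.succ_lt_succ hk, by simpa [pvC] using hc⟩
      · rintro ⟨k, hk, hc⟩
        cases k with
        | zero => exact Or.inl (by simpa [pvC] using hc)
        | succ k =>
          exact Or.inr ⟨k, by simpa using Nat.lt_of_succ_lt_succ hk, by simpa [pvC] using hc⟩

lemma pvInnerA_iff (n : Nat) (row : List Int) (hn : row.length ≤ n) :
    pvInnerA (n : Int) row = true ↔ ∃ k : Nat, k + 1 < row.length ∧ pvC row k = true := by
  simp only [pvInnerA, List.any_eq_true, PySem.List.mem_pyRange_neg_one]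
  constructor
  · rintro ⟨j, ⟨hj0, hjn⟩, hc⟩
    have h1 : PySem.List.pyGetD row j 0 = row.getD j.toNat 0 :=
      PySem.List.pyGetD_of_nonneg row 0 (by omega)
    by_cases hlt : j.toNat < row.length
    case neg =>
      -- j reads past the row: both disjuncts need a non-zero cell there, but getD defaults to 0
      exfalso
      rw [h1, List.getD_eq_default row 0 (by omega)] at hc
      simp at hc
    refine ⟨j.toNat - 1, by omega, ?_⟩
    have h2 : PySem.List.pyGetD row (j - 1) 0 = row.getD (j - 1).toNat 0 :=
      PySem.List.pyGetD_of_nonneg row 0 (by omega)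
    have e1 : j.toNat - 1 + 1 = j.toNat := by omega
    have e2 : (j - 1).toNat = j.toNat - 1 := by omega
    rw [h1, h2, e2] at hc
    simpa [pvC, e1] using hc
  · rintro ⟨k, hk, hc⟩
    refine ⟨((k + 1 : Nat) : Int), ⟨by omega, by omega⟩, ?_⟩
    have h1 : PySem.List.pyGetD row ((k + 1 : Nat) : Int) 0 = row.getD (k + 1) 0 :=
      PySem.List.pyGetD_natCast row (k + 1) 0
    have h2 : PySem.List.pyGetD row (((k + 1 : Nat) : Int) - 1) 0 = row.getD k 0 := by
      have : (((k + 1 : Nat) : Int) - 1) = ((k : Nat) : Int) := by push_cast; ring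
      rw [this]; exact PySem.List.pyGetD_natCast row k 0
    rw [h1, h2]
    simpa [pvC] using hc

-- the gap test on a row that starts with a zero: fires iff some later cell is non-zero
lemma pv_gap_zero_cons (l : List Int) :
    (!(((0 : Int) :: l).filter (fun x => !(x == 0)) ==
        ((0 : Int) :: l).take (((0 : Int) :: l).filter (fun x => !(x == 0))).length))
      = !(l.filter (fun x => !(x == 0)) == []) := by
  have hf : ((0 : Int) :: l).filter (fun x => !(x == 0)) = l.filter (fun x => !(x == 0)) := by
    simp
  rw [hf]
  cases hc : l.filter (fun x => !(x == 0)) with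
  | nil => simp
  | cons c s =>
    have hc0 : ¬(c == 0) = true := by
      have := List.mem_filter.mp (hc ▸ List.mem_cons_self (l := s))
      simpa using this.2
    simp only [List.length_cons, List.take_succ_cons]
    have hcne : c ≠ 0 := fun h => hc0 (by simp [h])
    simp [hcne]

lemma pvAdjScan_eq_pvRowCore (l : List Int) : pvAdjScan l = pvRowCore l := by
  induction l with
  | nil => rfl
  | cons a t ih =>
    cases t with
    | nil =>
      rcases eq_or_ne a 0 with ha | ha
      · subst ha; simp [pvAdjScan, pvRowCore]
      · simp [pvAdjScan, pvRowCore, ha]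
    | cons b rest =>
      by_cases ha : a = 0
      · subst ha
        by_cases hb : b = 0
        · subst hb
          -- both sides reduce to the tail statement for 0 :: rest
          have lhs : pvAdjScan ((0 : Int) :: (0 : Int) :: rest) = pvAdjScan ((0 : Int) :: rest) := by
            simp [pvAdjScan]
          rw [lhs, ih]
          simp only [pvRowCore]
          rw [pv_gap_zero_cons, pv_gap_zero_cons ((0 : Int) :: rest)]
          simp
        · -- b ≠ 0: both sides are true
          have lhs : pvAdjScan ((0 : Int) :: b :: rest) = true := by
            simp [pvAdjScan, hb]
          rw [lhs]
          simp only [pvRowCore]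
          rw [pv_gap_zero_cons]
          simp [hb]
      · -- a ≠ 0
        have hcond : (((b == a) && !(b == 0)) || (!(b == 0) && (a == 0))) = (b == a) := by
          rcases eq_or_ne b 0 with hb | hb
          · subst hb; simp [Ne.symm ha]
          · have h0 : (b == 0) = false := by simp [hb]
            have h1 : (a == 0) = false := by simp [ha]
            rw [h0, h1]
            simp
        have lhs : pvAdjScan (a :: b :: rest) = ((b == a) || pvAdjScan (b :: rest)) := by
          simp [pvAdjScan, hcond]
        rw [lhs, ih]
        by_cases hb : b = 0
        · subst hb
          simp only [pvRowCore]
          have hf : (a :: (0 : Int) :: rest).filter (fun x => !(x == 0)) =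
              a :: rest.filter (fun x => !(x == 0)) := by simp [ha]
          rw [hf, pv_gap_zero_cons]
          cases hr : rest.filter (fun x => !(x == 0)) with
          | nil =>
            simp [hr]
            exact fun h => ha h.symm
          | cons c s =>
            have hc0 : c ≠ 0 := by
              have := List.mem_filter.mp (hr ▸ List.mem_cons_self (l := s))
              simpa using this.2
            simp [hr, hc0]
        · -- b ≠ 0
          simp only [pvRowCore]
          have hf : (a :: b :: rest).filter (fun x => !(x == 0)) =
              a :: b :: rest.filter (fun x => !(x == 0)) := by simp [ha, hb]
          have hf2 : ((b :: rest).filter (fun x => !(x == 0))) =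
              b :: rest.filter (fun x => !(x == 0)) := by simp [hb]
          rw [hf, hf2]
          have hba : (b == a) = (a == b) := by
            rcases eq_or_ne a b with h | h
            · simp [h]
            · simp [h, Ne.symm h]
          simp only [List.length_cons, List.take_succ_cons, List.zip_cons_cons, List.tail_cons,
            List.any_cons, List.cons_beq_cons, beq_self_eq_true, Bool.true_and, hba]
          -- rearrange disjuncts: x || (G || M) = G || (x || M)
          simp [Bool.or_left_comm]

lemma pvInnerA_full (n : Nat) (row : List Int) (hn : row.length ≤ n) :
    pvInnerA (n : Int) row = pvRowCore row := by
  rw [← pvAdjScan_eq_pvRowCore]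
  have h1 := pvInnerA_iff n row hn
  have h2 := pvAdjScan_iff row
  cases hb : pvAdjScan row
  · cases ha : pvInnerA (n : Int) row
    · rfl
    · exact absurd (h2.mpr (h1.mp ha)) (by simp [hb])
  · exact h1.mpr (h2.mp hb)

-- pvInnerA only reads cells at indices < n, so the row may be truncated to its first n cells
lemma pvInnerA_take (n : Nat) (row : List Int) :
    pvInnerA (n : Int) row = pvInnerA (n : Int) (row.take n) := by
  unfold pvInnerA
  refine Bool.eq_iff_iff.mpr ?_
  simp only [List.any_eq_true]
  refine exists_congr fun j => and_congr_right fun hj => ?_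
  have hj' := PySem.List.mem_pyRange_neg_one.mp hj
  have e1 : PySem.List.pyGetD row j 0 = PySem.List.pyGetD (row.take n) j 0 := by
    rw [PySem.List.pyGetD_of_nonneg row 0 (by omega),
      PySem.List.pyGetD_of_nonneg (row.take n) 0 (by omega)]
    unfold List.getD
    rw [List.getElem?_take_of_lt (by omega)]
  have e2 : PySem.List.pyGetD row (j - 1) 0 = PySem.List.pyGetD (row.take n) (j - 1) 0 := by
    rw [PySem.List.pyGetD_of_nonneg row 0 (by omega),
      PySem.List.pyGetD_of_nonneg (row.take n) 0 (by omega)]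
    unfold List.getD
    rw [List.getElem?_take_of_lt (by omega)]
  rw [e1, e2]

lemma pvRow_eq (n : Nat) (row : List Int) :
    pvInnerA (n : Int) row = pvRowB n row := by
  rw [pvInnerA_take, pvRowB_eq_core]
  exact pvInnerA_full n (row.take n) (by simp)

-- ===== VERDICT (by name: the statement is the Claim_ definition above) =====
theorem can_pushing_left_spec : Claim_equal_can_pushing_left := by
  intro mat _ _
  show can_pushing_left mat = can_pushing_left_alt mat
  unfold can_pushing_left can_pushing_left_alt
  have houter : (PySem.List.pyRange 0 (PySem.List.len mat) 1).any
      (fun i => pvInnerA (PySem.List.len mat) (PySem.List.pyGetD mat i [])) =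
      mat.any (pvInnerA (PySem.List.len mat)) := by
    rw [show (fun i => pvInnerA (PySem.List.len mat) (PySem.List.pyGetD mat i [])) =
        (pvInnerA (PySem.List.len mat) ∘ fun j => PySem.List.pyGetD mat j []) from rfl]
    rw [← List.any_map, PySem.List.map_pyGetD_pyRange_zero]
  rw [houter]
  exact List.any_congr rfl (fun row => pvRow_eq mat.length row)
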